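-- pv_equiv track=rewrite | github.com/evgenii-malov/interviews | interview_21.08.2016/task3_string_patterns/string_patterns.py | get_subseqs
-- ===== SOURCE A (Python) =====
-- from itertools import takewhile, dropwhile, combinations
--
-- allow = set("abcdefghijklmnopqrstuvwxyz0123456789")
--
-- def get_subseqs(s):
--     chars = (c for c in s)
--     while True:
--         chars_tail = dropwhile(lambda x: x not in allow, chars)
--         subseq = takewhile(lambda x: x in allow, chars_tail)
--         subseq = "".join(list(subseq))
--
--         if not subseq:
--             break
--
--         if len(subseq) == 1:
--             continue
--
--         yield subseq
-- ===== SOURCE B (Python) =====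
-- allow = set("abcdefghijklmnopqrstuvwxyz0123456789")
--
-- def get_subseqs(s):
--     buf = ""
--     for c in s:
--         if c in allow:
--             buf += c
--         else:
--             if len(buf) > 1:
--                 yield buf
--             buf = ""
--     if len(buf) > 1:
--         yield buf
-- ===== Notes on version B (the rewrite author's own statement) =====
-- stated objective: simpler
-- what changed: B replaces A's repeated dropwhile/takewhile generator-chaining over a shared iterator with a single explicit pass maintaining a buffer of the current allowed-char run, flushed when a disallowed char or end of string is reached.
import Mathlib
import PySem

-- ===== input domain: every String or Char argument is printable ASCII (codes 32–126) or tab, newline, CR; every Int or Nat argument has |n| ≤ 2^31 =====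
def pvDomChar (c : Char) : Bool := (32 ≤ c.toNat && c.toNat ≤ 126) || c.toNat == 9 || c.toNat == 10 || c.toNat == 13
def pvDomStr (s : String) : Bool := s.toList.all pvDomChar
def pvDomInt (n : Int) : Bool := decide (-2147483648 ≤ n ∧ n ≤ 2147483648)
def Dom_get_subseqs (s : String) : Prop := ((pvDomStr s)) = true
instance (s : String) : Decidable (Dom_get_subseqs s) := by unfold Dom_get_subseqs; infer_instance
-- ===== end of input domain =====

-- B: single-pass buffer accumulator instead of A's repeated dropwhile/takewhile scans; simpler, same O(n) cost.

-- ===== PORT A =====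
-- the module-level allowed-character set
def pvAllow : List Char := "abcdefghijklmnopqrstuvwxyz0123456789".toList
def pvInAllow (c : Char) : Bool := pvAllow.contains c

-- A's while-loop: each iteration drops disallowed chars, takes the allowed run,
-- then continues on the remaining characters of the shared iterator.
def pvLoopA (cs : List Char) : List String :=
  let tail := cs.dropWhile (fun c => !(pvInAllow c))
  let run := tail.takeWhile pvInAllow
  if _h : run = [] then []
  else if run.length == 1 then pvLoopA (tail.drop run.length)
  else String.ofList run :: pvLoopA (tail.drop run.length)
termination_by cs.length
decreasing_by
  all_goals
    simp only [List.length_drop]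
    have h1 : (cs.dropWhile (fun c => !(pvInAllow c))).length ≤ cs.length :=
      List.length_dropWhile_le _ _
    have h2 : ((cs.dropWhile (fun c => !(pvInAllow c))).takeWhile pvInAllow).length ≠ 0 :=
      fun hh => _h (List.length_eq_zero_iff.mp hh)
    have h3 : ((cs.dropWhile (fun c => !(pvInAllow c))).takeWhile pvInAllow).length
        ≤ (cs.dropWhile (fun c => !(pvInAllow c))).length :=
      (List.takeWhile_sublist _).length_le
    omega

def get_subseqs (s : String) : List String := pvLoopA s.toList

-- ===== PORT B =====
-- B's for-loop: buf is the current run of allowed chars; flush on a disallowed char and at the end.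
def pvLoopB : List Char → List Char → List String
  | buf, [] => if buf.length > 1 then [String.ofList buf] else []
  | buf, c :: cs =>
    if pvInAllow c then pvLoopB (buf ++ [c]) cs
    else if buf.length > 1 then String.ofList buf :: pvLoopB [] cs
    else pvLoopB [] cs

def get_subseqs_alt (s : String) : List String := pvLoopB [] s.toList

-- ===== PRECONDITION & SPEC =====
def Spec_get_subseqs (s : String) (out : List String) : Prop := out = get_subseqs_alt s
instance (s : String) (out : List String) : Decidable (Spec_get_subseqs s out) := by unfold Spec_get_subseqs; infer_instance

-- ===== CLAIM (what is proved, stated in full; the proofs are below) =====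
def Claim_equal_get_subseqs : Prop := ∀ (s : String), Dom_get_subseqs s → Spec_get_subseqs s (get_subseqs s)

-- ===== LEMMAS AND PROOFS =====

def pvEmit (buf : List Char) : List String :=
  if buf.length > 1 then [String.ofList buf] else []

theorem pv_drop_takeWhile (p : Char → Bool) : ∀ l : List Char,
    l.drop (l.takeWhile p).length = l.dropWhile p
  | [] => rfl
  | c :: cs => by
    by_cases h : p c <;>
      simp [h, pv_drop_takeWhile p cs]

theorem pvLoopA_nil : pvLoopA [] = [] := by
  rw [pvLoopA]; rfl

theorem pvLoopA_cons_not (c : Char) (cs : List Char) (h : pvInAllow c = false) :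
    pvLoopA (c :: cs) = pvLoopA cs := by
  have hd : (c :: cs).dropWhile (fun x => !(pvInAllow x))
      = cs.dropWhile (fun x => !(pvInAllow x)) := by
    rw [List.dropWhile_cons]; simp [h]
  conv_lhs => rw [pvLoopA]
  conv_rhs => rw [pvLoopA]
  rw [hd]

-- one unfolding of A's loop as: emit the leading allowed run, then continue after it
theorem pvLoopA_step (l : List Char) :
    pvLoopA l = pvEmit (l.takeWhile pvInAllow) ++ pvLoopA (l.dropWhile pvInAllow) := by
  cases l with
  | nil => simp [pvEmit, pvLoopA_nil]
  | cons c cs =>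
    by_cases h : pvInAllow c
    · have htail : (c :: cs).dropWhile (fun x => !(pvInAllow x)) = c :: cs := by
        rw [List.dropWhile_cons]; simp [h]
      have hrun : (c :: cs).takeWhile pvInAllow = c :: cs.takeWhile pvInAllow := by
        rw [List.takeWhile_cons]; simp [h]
      have hdw : (c :: cs).dropWhile pvInAllow = cs.dropWhile pvInAllow := by
        rw [List.dropWhile_cons]; simp [h]
      conv_lhs => rw [pvLoopA]
      rw [htail, hrun, hdw,
        dif_neg (by exact List.cons_ne_nil c (cs.takeWhile pvInAllow))]
      simp only [List.length_cons, List.drop_succ_cons, pv_drop_takeWhile]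
      by_cases h0 : (cs.takeWhile pvInAllow).length = 0
      · rw [if_pos (by simp [h0])]
        simp [pvEmit, h0]
      · rw [if_neg (by simp [h0])]
        have hrl : (c :: cs.takeWhile pvInAllow).length > 1 := by
          simp only [List.length_cons]; omega
        rw [pvEmit, if_pos hrl]
        rfl
    · simp only [Bool.not_eq_true] at h
      have htw : (c :: cs).takeWhile pvInAllow = [] := by
        rw [List.takeWhile_cons]; simp [h]
      have hdw : (c :: cs).dropWhile pvInAllow = c :: cs := by
        rw [List.dropWhile_cons]; simp [h]
      rw [htw, hdw]
      simp [pvEmit]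

theorem pvLoopB_eq : ∀ (cs buf : List Char),
    pvLoopB buf cs = pvEmit (buf ++ cs.takeWhile pvInAllow) ++ pvLoopA (cs.dropWhile pvInAllow)
  | [], buf => by
    simp only [pvLoopB, List.takeWhile_nil, List.dropWhile_nil, List.append_nil, pvLoopA_nil,
      pvEmit]
  | c :: cs, buf => by
    by_cases h : pvInAllow c
    · rw [pvLoopB]
      simp only [h, if_true]
      rw [pvLoopB_eq cs (buf ++ [c]),
        List.takeWhile_cons_of_pos (by simpa using h),
        List.dropWhile_cons_of_pos (by simpa using h),
        List.append_assoc, List.singleton_append]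
    · simp only [Bool.not_eq_true] at h
      rw [pvLoopB]
      simp only [h, Bool.false_eq_true, if_false]
      have hrec : pvLoopB [] cs
          = pvEmit (cs.takeWhile pvInAllow) ++ pvLoopA (cs.dropWhile pvInAllow) := by
        simpa using pvLoopB_eq cs []
      have hA : pvLoopA (c :: cs) = pvLoopA cs := pvLoopA_cons_not c cs h
      have htw : (c :: cs).takeWhile pvInAllow = [] := by
        rw [List.takeWhile_cons]; simp [h]
      have hdw : (c :: cs).dropWhile pvInAllow = c :: cs := by
        rw [List.dropWhile_cons]; simp [h]
      rw [htw, hdw, List.append_nil, hA, pvLoopA_step cs, hrec]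
      by_cases hb : buf.length > 1 <;> simp [pvEmit, hb]

-- ===== VERDICT (by name: the statement is the Claim_ definition above) =====
theorem get_subseqs_spec : Claim_equal_get_subseqs := by
  intro s _
  show get_subseqs s = get_subseqs_alt s
  unfold get_subseqs get_subseqs_alt
  rw [pvLoopB_eq, List.nil_append, ← pvLoopA_step]
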